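-- pv_equiv track=rewrite | github.com/shmyhero/waverider | strategies/macdspy.py | get_max_bar
-- ===== SOURCE A (Python) =====
-- def get_max_bar(macd_bar):
--     max_bar = 0
--     for i in range(len(macd_bar)):
--         bar = macd_bar[-i-1]
--         if bar < 0:
--             break
--         elif bar > max_bar:
--             max_bar = bar
--     return max_bar
-- ===== SOURCE B (Python) =====
-- def get_max_bar(macd_bar):
--     # split point: one past the last negative element (0 if there is none)
--     cut = 0
--     for i in range(len(macd_bar)):
--         if macd_bar[i] < 0:
--             cut = i + 1
--     # the trailing non-negative run; its max, or 0 when it is empty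
--     return max(macd_bar[cut:], default=0)
-- ===== Notes on version B (the rewrite author's own statement) =====
-- stated objective: alternative
-- what changed: A fuses finding the trailing non-negative run and taking its max into one backward loop with a break; B first locates the split point (one past the last negative element) in a forward pass, then returns max of the trailing slice with default 0.
import Mathlib
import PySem

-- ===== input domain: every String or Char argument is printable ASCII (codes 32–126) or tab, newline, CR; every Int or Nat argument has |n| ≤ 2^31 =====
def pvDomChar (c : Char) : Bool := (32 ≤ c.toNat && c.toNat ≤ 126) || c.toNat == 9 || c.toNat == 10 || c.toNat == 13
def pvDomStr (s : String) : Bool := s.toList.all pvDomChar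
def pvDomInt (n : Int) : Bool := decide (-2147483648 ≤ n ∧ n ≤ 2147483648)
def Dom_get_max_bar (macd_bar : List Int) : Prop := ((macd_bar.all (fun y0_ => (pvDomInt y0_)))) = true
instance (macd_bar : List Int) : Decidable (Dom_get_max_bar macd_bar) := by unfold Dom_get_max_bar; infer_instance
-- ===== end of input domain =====

-- B replaces A's fused backward scan-with-break by two separate steps (find the index after the
-- last negative element, then max of the trailing slice with default 0): a different decomposition
-- of the same computation (objective: alternative; no speed claim).

-- ===== PORT A =====
-- A: max_bar = 0; for i in range(len(xs)): bar = xs[-i-1]; break on bar < 0, update on bar > max_bar.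
def get_max_bar_go (macd_bar : List Int) (is : List Int) (max_bar : Int) : Int :=
  match is with
  | [] => max_bar
  | i :: rest =>
    let bar := PySem.List.pyGetD macd_bar (-i - 1) 0   -- index -i-1 is always in range for i ∈ range(len)
    if bar < 0 then max_bar
    else if bar > max_bar then get_max_bar_go macd_bar rest bar
    else get_max_bar_go macd_bar rest max_bar

def get_max_bar (macd_bar : List Int) : Int :=
  get_max_bar_go macd_bar (PySem.List.pyRange 0 (PySem.List.len macd_bar) 1) 0

-- ===== PORT B =====
-- B: cut = 0; for i in range(len(xs)): if xs[i] < 0: cut = i + 1; return max(xs[cut:], default=0)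
def get_max_bar_cut (macd_bar : List Int) (is : List Int) (cut : Int) : Int :=
  match is with
  | [] => cut
  | i :: rest =>
    get_max_bar_cut macd_bar rest
      (if PySem.List.pyGetD macd_bar i 0 < 0 then i + 1 else cut)

def get_max_bar_alt (macd_bar : List Int) : Int :=
  match PySem.List.max?
      (PySem.List.slice macd_bar
        (some (get_max_bar_cut macd_bar (PySem.List.pyRange 0 (PySem.List.len macd_bar) 1) 0))
        none)
      (fun x => x) with
  | some m => m
  | none => 0

-- ===== PRECONDITION & SPEC =====
def Spec_get_max_bar (macd_bar : List Int) (out : Int) : Prop := out = get_max_bar_alt macd_bar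
instance (macd_bar : List Int) (out : Int) : Decidable (Spec_get_max_bar macd_bar out) := by unfold Spec_get_max_bar; infer_instance

-- ===== CLAIM (what is proved, stated in full; the proofs are below) =====
def Claim_equal_get_max_bar : Prop := ∀ (macd_bar : List Int), Dom_get_max_bar macd_bar → Spec_get_max_bar macd_bar (get_max_bar macd_bar)

-- ===== LEMMAS AND PROOFS =====

-- the trailing non-negative run, read from the back
def pvTail (xs : List Int) : List Int := xs.reverse.takeWhile (fun b => decide (0 ≤ b))

lemma pvTail_len_le (xs : List Int) : (pvTail xs).length ≤ xs.length := by
  have := List.takeWhile_sublist (l := xs.reverse) (p := fun b => decide (0 ≤ b))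
  simpa [pvTail] using this.length_le

-- A's loop from index k onward is a running max over the rest of the reversed trailing run
lemma go_eq_foldl (xs : List Int) : ∀ (k : Nat) (m : Int), k ≤ xs.length →
    get_max_bar_go xs (PySem.List.pyRange (k : Int) (xs.length : Int) 1) m
      = ((xs.reverse.drop k).takeWhile (fun b => decide (0 ≤ b))).foldl max m := by
  intro k m hk
  induction hn : xs.length - k generalizing k m with
  | zero =>
    have hk' : k = xs.length := by omega
    rw [PySem.List.pyRange_one_eq_nil (by omega),
        List.drop_eq_nil_of_le (by simp [hk']), List.takeWhile_nil]
    simp [get_max_bar_go]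
  | succ j ih =>
    have hklt : k < xs.length := by omega
    rw [PySem.List.pyRange_one_cons (by exact_mod_cast hklt)]
    have hrev : k < xs.reverse.length := by simpa using hklt
    have hdrop := List.drop_eq_getElem_cons hrev
    have hbar : PySem.List.pyGetD xs (-(k : Int) - 1) 0 = xs.reverse[k] := by
      have h1 : (-(k : Int) - 1) = -(((k + 1 : Nat) : Int)) := by push_cast; ring
      rw [h1, PySem.List.pyGetD_neg_natCast xs (k + 1) 0 (by omega) (by omega),
          List.getElem_reverse]
      congr 1
      omega
    simp only [get_max_bar_go, hbar, hdrop, List.takeWhile_cons]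
    generalize xs.reverse[k] = x
    by_cases hneg : x < 0
    · rw [if_pos hneg, if_neg (show ¬(decide ((0 : Int) ≤ x) = true) by simp [not_le.mpr hneg]),
          List.foldl_nil]
    · have hle : (0 : Int) ≤ x := not_lt.mp hneg
      rw [if_neg hneg, if_pos (show decide ((0 : Int) ≤ x) = true by simpa using hle),
          List.foldl_cons,
          show ((k : Int) + 1) = ((k + 1 : Nat) : Int) by push_cast; ring]
      have hgo : (if x > m then
            get_max_bar_go xs (PySem.List.pyRange ((k + 1 : Nat) : Int) (xs.length : Int) 1) x
          else get_max_bar_go xs (PySem.List.pyRange ((k + 1 : Nat) : Int) (xs.length : Int) 1) m)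
          = get_max_bar_go xs (PySem.List.pyRange ((k + 1 : Nat) : Int) (xs.length : Int) 1) (max m x) := by
        by_cases hgt : x > m
        · rw [if_pos hgt, max_eq_right (le_of_lt hgt)]
        · rw [if_neg hgt, max_eq_left (not_lt.mp hgt)]
      rw [hgo, ih (k + 1) (max m x) (by omega) (by omega)]

-- B's cut loop is tail-recursive, so appending one index postpones just one step
lemma cut_snoc (xs : List Int) (is : List Int) (j c : Int) :
    get_max_bar_cut xs (is ++ [j]) c
      = (if PySem.List.pyGetD xs j 0 < 0 then j + 1 else get_max_bar_cut xs is c) := by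
  induction is generalizing c with
  | nil => simp [get_max_bar_cut]
  | cons i rest ih => simp only [List.cons_append, get_max_bar_cut, ih]

-- B's cut over the first j indices = j minus the length of the trailing run of the prefix
lemma cut_eq (xs : List Int) : ∀ (j : Nat), j ≤ xs.length →
    get_max_bar_cut xs (PySem.List.pyRange 0 (j : Int) 1) 0
      = (j : Int) - ((pvTail (xs.take j)).length : Int) := by
  intro j hj
  induction j with
  | zero =>
    rw [PySem.List.pyRange_one_eq_nil (by omega)]
    simp [get_max_bar_cut, pvTail]
  | succ j ih =>
    have hjlt : j < xs.length := by omega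
    rw [show ((j + 1 : Nat) : Int) = (j : Int) + 1 by push_cast; ring,
        PySem.List.pyRange_one_succ_right (by omega), cut_snoc]
    have hget : PySem.List.pyGetD xs (j : Int) 0 = xs[j] := by
      rw [PySem.List.pyGetD_natCast]
      exact List.getD_eq_getElem xs 0 hjlt
    have hrevtake : (xs.take (j + 1)).reverse = xs[j] :: (xs.take j).reverse := by
      rw [List.take_succ_eq_append_getElem hjlt]
      simp
    by_cases hneg : xs[j] < 0
    · rw [if_pos (by rw [hget]; exact hneg)]
      have h0 : pvTail (xs.take (j + 1)) = [] := by
        rw [pvTail, hrevtake, List.takeWhile_cons, if_neg (by simp [not_le.mpr hneg])]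
      rw [h0]
      simp
    · rw [if_neg (by rw [hget]; exact hneg), ih (by omega)]
      have hle : (0 : Int) ≤ xs[j] := not_lt.mp hneg
      have h1 : pvTail (xs.take (j + 1)) = xs[j] :: pvTail (xs.take j) := by
        rw [pvTail, hrevtake, List.takeWhile_cons, if_pos (by simpa using hle)]
        rfl
      rw [h1, List.length_cons]
      push_cast
      ring

-- dropping everything before the trailing run leaves exactly its reverse
lemma drop_eq_tail_reverse (xs : List Int) :
    xs.drop (xs.length - (pvTail xs).length) = (pvTail xs).reverse := by
  have htake : xs.reverse.take (pvTail xs).length = pvTail xs :=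
    (List.prefix_iff_eq_take.mp (List.takeWhile_prefix _)).symm
  have h := List.reverse_take (l := xs.reverse) (i := (pvTail xs).length)
  rw [htake, List.reverse_reverse] at h
  simp only [List.length_reverse] at h
  exact h.symm

-- every element of the trailing run is non-negative
lemma tail_nonneg (xs : List Int) : ∀ b ∈ pvTail xs, (0 : Int) ≤ b := by
  intro b hb
  have := List.mem_takeWhile_imp (l := xs.reverse) hb
  simpa using this

-- folding max over a reversed list gives the same value
lemma foldl_max_reverse (l : List Int) (a : Int) : l.reverse.foldl max a = l.foldl max a := by
  rw [List.foldl_reverse,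
      show (fun (x y : Int) => max y x) = max from funext fun x => funext fun y => max_comm y x]
  exact (List.foldl_eq_foldr a l).symm

-- the max-with-default of the reversed run equals A's running max from 0
lemma max_match (l : List Int) (hnn : ∀ b ∈ l, (0 : Int) ≤ b) :
    (match PySem.List.max? l.reverse (fun x => x) with
      | some m => m
      | none => (0 : Int)) = l.foldl max 0 := by
  cases hl : l.reverse with
  | nil =>
    have : l = [] := by simpa using congrArg List.reverse hl
    simp [this, PySem.List.max?]
  | cons x t =>
    rw [PySem.List.max?_id_cons]
    have hfold : l.foldl max 0 = l.reverse.foldl max 0 := (foldl_max_reverse l 0).symm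
    rw [hfold, hl]
    simp only [List.foldl_cons]
    have hx : (0 : Int) ≤ x := by
      apply hnn
      have : x ∈ l.reverse := by rw [hl]; exact List.mem_cons_self
      simpa using this
    rw [max_eq_right hx]

-- ===== VERDICT (by name: the statement is the Claim_ definition above) =====
theorem get_max_bar_spec : Claim_equal_get_max_bar := by
  intro xs _
  unfold Spec_get_max_bar get_max_bar get_max_bar_alt
  rw [PySem.List.len_eq]
  have hA := go_eq_foldl xs 0 0 (by omega)
  rw [show ((0 : Nat) : Int) = (0 : Int) from rfl, List.drop_zero] at hA
  rw [hA, cut_eq xs xs.length (le_refl _), List.take_length,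
      show (xs.length : Int) - ((pvTail (xs : List Int)).length : Int)
          = ((xs.length - (pvTail xs).length : Nat) : Int) by
        have := pvTail_len_le xs; omega,
      PySem.List.slice_from_natCast, drop_eq_tail_reverse]
  exact (max_match (pvTail xs) (tail_nonneg xs)).symm
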